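-- pv_equiv track=rewrite | github.com/hunterjsb/xn-mc | scripts/migrate_infoboxes.py | _find_table_end
-- ===== SOURCE A (Python) =====
-- def _find_table_end(wikitext, start):
--     """Find matching |} for a {| at position start, handling nesting."""
--     depth = 0
--     i = start
--     while i < len(wikitext):
--         if wikitext[i:i+2] == '{|':
--             depth += 1
--             i += 2
--         elif wikitext[i:i+2] == '|}':
--             depth -= 1
--             if depth == 0:
--                 end = i + 2
--                 return end
--             i += 2
--         else:
--             i += 1
--     return None
-- ===== SOURCE B (Python) =====
-- from itertools import accumulate
--
-- def _find_table_end(wikitext, start):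
--     """Find matching |} for a {| at position start, handling nesting."""
--     # Pass 1: tokenize by jumping straight to each '|' with str.find — every
--     # delimiter contains a '|' ('{|' at j-1..j, '|}' at j..j+1).
--     toks = []  # (delta, end-position) per delimiter, in order
--     i = start
--     find = wikitext.find
--     while True:
--         j = find('|', i)
--         if j == -1:
--             break
--         if j - 1 >= i and wikitext[j - 1] == '{':
--             toks.append((1, j + 1))
--             i = j + 1
--         elif wikitext[j + 1:j + 2] == '}':
--             toks.append((-1, j + 2))
--             i = j + 2
--         else:
--             i = j + 1
--     # Pass 2: running nesting depths; pass 3: first '|}' whose depth is 0.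
--     depths = accumulate(d for d, _ in toks)
--     return next((end for (delta, end), depth in zip(toks, depths)
--                  if delta == -1 and depth == 0), None)
-- ===== Notes on version B (the rewrite author's own statement) =====
-- stated objective: alternative
-- what changed: Replaces A's fused per-character counter loop by three staged passes: a tokenizer that jumps straight to each '|' with str.find and emits a (delta, end) list, itertools.accumulate of the nesting depths, and a search for the first closing token whose depth is 0.
-- outside the precondition, e.g. on _find_table_end('{a|}{| ', -3): A returns 4, B returns None
import Mathlib
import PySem

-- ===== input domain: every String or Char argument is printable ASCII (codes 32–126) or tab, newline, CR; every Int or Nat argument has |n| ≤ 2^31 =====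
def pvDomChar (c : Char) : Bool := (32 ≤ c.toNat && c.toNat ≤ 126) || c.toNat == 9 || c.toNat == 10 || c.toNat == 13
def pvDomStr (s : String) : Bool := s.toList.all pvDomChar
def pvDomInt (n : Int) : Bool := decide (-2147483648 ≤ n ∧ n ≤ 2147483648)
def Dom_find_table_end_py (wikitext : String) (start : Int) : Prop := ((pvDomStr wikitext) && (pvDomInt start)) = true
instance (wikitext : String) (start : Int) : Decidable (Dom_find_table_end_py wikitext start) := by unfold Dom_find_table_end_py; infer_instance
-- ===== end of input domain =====

-- B replaces A's fused per-position counter loop by three staged passes — a tokenizer that jumps between '|' characters with str.find, itertools.accumulate of the nesting depths, and a search for the first closing token at depth 0 (alternative decomposition; return value only).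


-- ===== PORT A =====
-- the while-loop of A: state (depth, i); wikitext[i:i+2] is PySem.List.slice (Python slice
-- semantics). The fuel argument only makes the recursion structural (each iteration advances i
-- by at least 1 and the loop stops at cs.length, so (cs.length - start).toNat + 1 steps always
-- suffice); it never changes the computed value.
def pvLoopAGo (cs : List Char) : Nat → Int → Int → Option Int
  | 0, _, _ => none
  | fuel + 1, depth, i =>
    if i < (cs.length : Int) then
      if PySem.List.slice cs (some i) (some (i + 2)) = ['{', '|'] then
        pvLoopAGo cs fuel (depth + 1) (i + 2)
      else if PySem.List.slice cs (some i) (some (i + 2)) = ['|', '}'] then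
        if depth - 1 = 0 then some (i + 2)
        else pvLoopAGo cs fuel (depth - 1) (i + 2)
      else pvLoopAGo cs fuel depth (i + 1)
    else none

def find_table_end_py (wikitext : String) (start : Int) : Option Int :=
  pvLoopAGo wikitext.toList (((wikitext.toList.length : Int) - start).toNat + 1) 0 start

-- ===== PORT B =====
-- pass 1 of B: the tokenizing while-loop; j = wikitext.find('|', i) is PySem.Chars.findFrom,
-- wikitext[j-1] is pyGet?, wikitext[j+1:j+2] is slice; each iteration yields one (delta, end) pair.
-- The fuel argument only makes the recursion structural (every step moves past a found '|', so
-- cs.length + 1 steps always suffice); it never changes the computed value.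
def pvTokensBGo (cs : List Char) : Nat → Int → List (Int × Int)
  | 0, _ => []
  | fuel + 1, i =>
    if PySem.Chars.findFrom cs ['|'] i none = -1 then []
    else if i ≤ PySem.Chars.findFrom cs ['|'] i none - 1 ∧
            PySem.List.pyGet? cs (PySem.Chars.findFrom cs ['|'] i none - 1) = some '{' then
      (1, PySem.Chars.findFrom cs ['|'] i none + 1) ::
        pvTokensBGo cs fuel (PySem.Chars.findFrom cs ['|'] i none + 1)
    else if PySem.List.slice cs (some (PySem.Chars.findFrom cs ['|'] i none + 1))
              (some (PySem.Chars.findFrom cs ['|'] i none + 2)) = ['}'] then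
      (-1, PySem.Chars.findFrom cs ['|'] i none + 2) ::
        pvTokensBGo cs fuel (PySem.Chars.findFrom cs ['|'] i none + 2)
    else pvTokensBGo cs fuel (PySem.Chars.findFrom cs ['|'] i none + 1)

def pvTokensB (cs : List Char) (i : Int) : List (Int × Int) :=
  pvTokensBGo cs (cs.length + 1) i

-- pass 2 of B: itertools.accumulate of the deltas (running value acc)
def pvAccum : List Int → Int → List Int
  | [], _ => []
  | d :: rest, acc => (acc + d) :: pvAccum rest (acc + d)

-- pass 3 of B: next((end for (delta, end), depth in zip(toks, depths) if delta == -1 and depth == 0), None)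
def pvSearch : List ((Int × Int) × Int) → Option Int
  | [] => none
  | ((delta, e), s) :: rest => if delta = -1 ∧ s = 0 then some e else pvSearch rest

def find_table_end_py_alt (wikitext : String) (start : Int) : Option Int :=
  pvSearch ((pvTokensB wikitext.toList start).zip
    (pvAccum ((pvTokensB wikitext.toList start).map Prod.fst) 0))

-- ===== PRECONDITION & SPEC =====
-- Pre_ excludes negative start, where A's Python-slice wraparound and str.find's negative-pos
-- clamping are two different accidents and neither value is specified.
def Pre_find_table_end_py (wikitext : String) (start : Int) : Prop := 0 ≤ start
instance (wikitext : String) (start : Int) : Decidable (Pre_find_table_end_py wikitext start) := by unfold Pre_find_table_end_py; infer_instance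
def pvWitness_find_table_end_py : String × Int := ("a{|x{||}y|}b", 1)

def Spec_find_table_end_py (wikitext : String) (start : Int) (out : Option Int) : Prop := out = find_table_end_py_alt wikitext start
instance (wikitext : String) (start : Int) (out : Option Int) : Decidable (Spec_find_table_end_py wikitext start out) := by unfold Spec_find_table_end_py; infer_instance

-- ===== CLAIM (what is proved, stated in full; the proofs are below) =====
def Claim_equal_find_table_end_py : Prop := ∀ (wikitext : String) (start : Int), Dom_find_table_end_py wikitext start → Pre_find_table_end_py wikitext start → Spec_find_table_end_py wikitext start (find_table_end_py wikitext start)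

-- ===== LEMMAS AND PROOFS =====

-- bounds fact about wikitext.find('|', i) (= PySem.Chars.findFrom), used by the equivalence proof
theorem pvFind_bar_lt (cs : List Char) (i : Int)
    (h : PySem.Chars.findFrom cs ['|'] i none ≠ -1) :
    i ≤ PySem.Chars.findFrom cs ['|'] i none ∧
      PySem.Chars.findFrom cs ['|'] i none < (cs.length : Int) := by
  simp only [PySem.Chars.findFrom] at h ⊢
  set st := if i < 0 then (if i + (cs.length:Int) < 0 then 0 else i + cs.length) else i with hst
  simp only [Int.toNat_natCast, List.take_length] at h ⊢
  set r := PySem.Chars.find (List.drop st.toNat cs) ['|'] with hr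
  have hstb : 0 ≤ st ∧ i ≤ st := by rw [hst]; split_ifs <;> omega
  split_ifs at h ⊢ with h1 h2
  · exact absurd rfl h
  · exact absurd rfl h
  · have hr0 : 0 ≤ r := (PySem.Chars.find_nonneg_iff _ _).mpr ((PySem.Chars.find_ne_neg_one_iff _ _).mp h2)
    obtain ⟨hpre, -⟩ := PySem.Chars.find_spec hr0
    have hlen := hpre.length_le
    simp [List.length_drop] at hlen
    omega


-- proof-only intermediate: A's scan phrased as a tokenizer (same per-position conditions as A)
def pvMatchesA (cs : List Char) (i : Int) : List (Int × Int) :=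
  if _h : i < (cs.length : Int) then
    if PySem.List.slice cs (some i) (some (i + 2)) = ['{', '|'] then
      (1, i + 2) :: pvMatchesA cs (i + 2)
    else if PySem.List.slice cs (some i) (some (i + 2)) = ['|', '}'] then
      (-1, i + 2) :: pvMatchesA cs (i + 2)
    else pvMatchesA cs (i + 1)
  else []
termination_by ((cs.length : Int) - i).toNat
decreasing_by all_goals omega

-- proof-only intermediate: the fused depth fold over a token list
def pvFoldT : List (Int × Int) → Int → Option Int
  | [], _ => none
  | (d, e) :: rest, depth => if d = -1 ∧ depth + d = 0 then some e else pvFoldT rest (depth + d)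

-- B's passes 2+3 fuse into the depth fold
theorem pvSearch_zip_accum (toks : List (Int × Int)) : ∀ depth : Int,
    pvSearch (toks.zip (pvAccum (toks.map Prod.fst) depth)) = pvFoldT toks depth := by
  induction toks with
  | nil => intro depth; simp [pvAccum, pvSearch, pvFoldT]
  | cons hd tl ih =>
    intro depth
    obtain ⟨d, e⟩ := hd
    simp only [List.map, pvAccum, List.zip, List.zipWith, pvSearch, pvFoldT]
    split_ifs with h1
    · rfl
    · exact ih _

-- A's loop is the depth fold over A's per-position token list (with adequate fuel)
theorem pvLoopAGo_eq_foldT (cs : List Char) : ∀ (fuel : Nat) (depth i : Int),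
    (cs.length : Int) < i + fuel →
    pvLoopAGo cs fuel depth i = pvFoldT (pvMatchesA cs i) depth := by
  intro fuel
  induction fuel with
  | zero =>
    intro depth i hlen
    rw [pvLoopAGo, pvMatchesA]
    simp [show ¬ i < (cs.length : Int) by omega, pvFoldT]
  | succ fuel ih =>
    intro depth i hlen
    rw [pvLoopAGo, pvMatchesA]
    by_cases h : i < (cs.length : Int)
    · simp only [h, if_pos, dif_pos]
      by_cases hopen : PySem.List.slice cs (some i) (some (i + 2)) = ['{', '|']
      · simp only [hopen, if_pos]
        rw [ih (depth + 1) (i + 2) (by push_cast at hlen ⊢; omega)]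
        simp [pvFoldT]
      · simp only [hopen, if_false]
        by_cases hclose : PySem.List.slice cs (some i) (some (i + 2)) = ['|', '}']
        · simp only [hclose, if_pos]
          by_cases hz : depth - 1 = 0
          · have hz' : depth + -1 = 0 := by omega
            simp [hz, hz', pvFoldT]
          · have hz' : ¬ depth + -1 = 0 := by omega
            have e : depth + -1 = depth - 1 := by ring
            simp only [hz, if_false, pvFoldT, e]
            exact ih (depth - 1) (i + 2) (by push_cast at hlen ⊢; omega)
        · simp only [hclose, if_false]
          exact ih depth (i + 1) (by push_cast at hlen ⊢; omega)
    · simp [h, pvFoldT]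

theorem pvGet_lt_length (cs : List Char) (p : Int) (h : 0 ≤ p) (c : Char)
    (hc : PySem.List.pyGet? cs p = some c) : p < (cs.length : Int) := by
  rw [PySem.List.pyGet?_of_nonneg _ h] at hc
  obtain ⟨hlt, -⟩ := List.getElem?_eq_some_iff.mp hc
  omega

theorem pvTakeDropTwo (cs : List Char) (n : Nat) (a b : Char) :
    List.take 2 (List.drop n cs) = [a, b] ↔ cs[n]? = some a ∧ cs[n+1]? = some b := by
  rw [show cs[n]? = (List.drop n cs)[0]? by simp [List.getElem?_drop],
      show cs[n+1]? = (List.drop n cs)[1]? by simp [List.getElem?_drop]]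
  cases hd : List.drop n cs with
  | nil => simp
  | cons x t => cases t with
    | nil => simp
    | cons y t2 => simp [List.take]

-- two-char slice versus the two element reads (0 ≤ i)
theorem pvSlice2_iff (cs : List Char) (i : Int) (h : 0 ≤ i) (a b : Char) :
    PySem.List.slice cs (some i) (some (i + 2)) = [a, b] ↔
      PySem.List.pyGet? cs i = some a ∧ PySem.List.pyGet? cs (i + 1) = some b := by
  rw [PySem.List.slice_toNat _ h (by omega),
    PySem.List.pyGet?_of_nonneg _ h, PySem.List.pyGet?_of_nonneg _ (by omega : (0:Int) ≤ i + 1),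
    (by omega : (i + 2).toNat - i.toNat = 2), (by omega : (i + 1).toNat = i.toNat + 1)]
  exact pvTakeDropTwo cs i.toNat a b

-- one-char slice versus the element read (0 ≤ i)
theorem pvSlice1_iff (cs : List Char) (i : Int) (h : 0 ≤ i) (a : Char) :
    PySem.List.slice cs (some i) (some (i + 1)) = [a] ↔
      PySem.List.pyGet? cs i = some a := by
  rw [PySem.List.slice_toNat _ h (by omega),
    PySem.List.pyGet?_of_nonneg _ h,
    (by omega : (i + 1).toNat - i.toNat = 1),
    show cs[i.toNat]? = (List.drop i.toNat cs)[0]? by simp [List.getElem?_drop]]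
  cases hd : List.drop i.toNat cs with
  | nil => simp
  | cons x t => simp [List.take]

theorem pvBarPrefix (l : List Char) (a : Char) : ([a] <+: l) ↔ l[0]? = some a := by
  cases l with
  | nil => simp
  | cons x t => simp [List.prefix_cons_iff, eq_comm]

-- full character spec of find('|', i) for 0 ≤ i
theorem pvFind_bar_spec (cs : List Char) (i : Int) (h0 : 0 ≤ i)
    (h : PySem.Chars.findFrom cs ['|'] i none ≠ -1) :
    PySem.List.pyGet? cs (PySem.Chars.findFrom cs ['|'] i none) = some '|' ∧
      ∀ p, i ≤ p → p < PySem.Chars.findFrom cs ['|'] i none →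
        PySem.List.pyGet? cs p ≠ some '|' := by
  by_cases hlen : i ≤ (cs.length : Int)
  · have hcast : i = ((i.toNat : Nat) : Int) := by omega
    rw [hcast] at h ⊢
    obtain ⟨hle, hpre, hmin⟩ :=
      PySem.Chars.findFrom_natCast_spec cs ['|'] i.toNat (by omega) h
    set j := PySem.Chars.findFrom cs ['|'] ((i.toNat : Nat) : Int) with hj
    have hj0 : 0 ≤ j := le_trans (by omega) hle
    constructor
    · rw [PySem.List.pyGet?_of_nonneg _ hj0]
      have := (pvBarPrefix _ _).mp hpre
      rwa [List.getElem?_drop, Nat.add_zero] at this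
    · intro p hp1 hp2 hc
      have hp0 : 0 ≤ p := by omega
      rw [PySem.List.pyGet?_of_nonneg _ hp0] at hc
      have : ([('|' : Char)] <+: List.drop p.toNat cs) := by
        rw [pvBarPrefix, List.getElem?_drop, Nat.add_zero]; exact hc
      exact hmin p.toNat (by omega) (by omega) this
  · exfalso
    apply h
    simp only [PySem.Chars.findFrom]
    rw [if_neg (by omega : ¬ i < 0), if_pos (by omega : (cs.length : Int) < i)]

theorem pvFind_bar_none (cs : List Char) (i : Int) (h0 : 0 ≤ i)
    (h : PySem.Chars.findFrom cs ['|'] i none = -1) :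
    ∀ p, i ≤ p → PySem.List.pyGet? cs p ≠ some '|' := by
  intro p hp hc
  have hp0 : 0 ≤ p := by omega
  rw [PySem.List.pyGet?_of_nonneg _ hp0] at hc
  obtain ⟨hplen, -⟩ := List.getElem?_eq_some_iff.mp hc
  by_cases hlen : i ≤ (cs.length : Int)
  · have hcast : i = ((i.toNat : Nat) : Int) := by omega
    rw [hcast] at h
    have hni := (PySem.Chars.findFrom_natCast_eq_neg_one_iff cs ['|'] i.toNat (by omega)).mp h
    apply hni
    rw [List.singleton_infix_iff]
    have : (List.drop i.toNat cs)[p.toNat - i.toNat]? = some '|' := by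
      rw [List.getElem?_drop, (by omega : i.toNat + (p.toNat - i.toNat) = p.toNat)]; exact hc
    exact List.mem_of_getElem? this
  · omega

-- A's tokenizer finds nothing when no '|' remains
theorem pvMatchesA_nil (cs : List Char) (i : Int) (h0 : 0 ≤ i)
    (hnb : ∀ p, i ≤ p → PySem.List.pyGet? cs p ≠ some '|') :
    pvMatchesA cs i = [] := by
  by_cases h1 : i < (cs.length : Int)
  · have hopen : ¬ PySem.List.slice cs (some i) (some (i + 2)) = ['{', '|'] :=
      fun hc => hnb (i+1) (by omega) ((pvSlice2_iff cs i h0 _ _).mp hc).2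
    have hclose : ¬ PySem.List.slice cs (some i) (some (i + 2)) = ['|', '}'] :=
      fun hc => hnb i le_rfl ((pvSlice2_iff cs i h0 _ _).mp hc).1
    rw [pvMatchesA]
    simp only [h1, hopen, hclose, dif_pos, if_false]
    exact pvMatchesA_nil cs (i+1) (by omega) (fun p hp => hnb p (by omega))
  · rw [pvMatchesA]; simp [h1]
termination_by ((cs.length : Int) - i).toNat
decreasing_by omega

-- skipping from i up to j-1 when the first '|' is at j and an opening token sits at j-1
theorem pvMatchesA_skip_open (cs : List Char) (j : Int)
    (hj : PySem.List.pyGet? cs j = some '|')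
    (i : Int) (h0 : 0 ≤ i) (hij : i ≤ j - 1)
    (hnb : ∀ p, i ≤ p → p < j → PySem.List.pyGet? cs p ≠ some '|') :
    pvMatchesA cs i = pvMatchesA cs (j - 1) := by
  by_cases he : i = j - 1
  · rw [he]
  · have hi : i < j - 1 := by omega
    have hjlen : j < (cs.length : Int) := pvGet_lt_length cs j (by omega) _ hj
    have h1 : i < (cs.length : Int) := by omega
    have hopen : ¬ PySem.List.slice cs (some i) (some (i + 2)) = ['{', '|'] :=
      fun hc => hnb (i+1) (by omega) (by omega) ((pvSlice2_iff cs i h0 _ _).mp hc).2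
    have hclose : ¬ PySem.List.slice cs (some i) (some (i + 2)) = ['|', '}'] :=
      fun hc => hnb i le_rfl (by omega) ((pvSlice2_iff cs i h0 _ _).mp hc).1
    rw [pvMatchesA]
    simp only [h1, hopen, hclose, dif_pos, if_false]
    exact pvMatchesA_skip_open cs j hj (i+1) (by omega) (by omega)
      (fun p hp1 hp2 => hnb p (by omega) hp2)
termination_by (j - i).toNat
decreasing_by omega

-- skipping from i up to j when the first '|' is at j and no opening token sits at j-1
theorem pvMatchesA_skip_to (cs : List Char) (j : Int)
    (hj : PySem.List.pyGet? cs j = some '|')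
    (i : Int) (h0 : 0 ≤ i) (hij : i ≤ j)
    (hno : i ≤ j - 1 → PySem.List.pyGet? cs (j - 1) ≠ some '{')
    (hnb : ∀ p, i ≤ p → p < j → PySem.List.pyGet? cs p ≠ some '|') :
    pvMatchesA cs i = pvMatchesA cs j := by
  by_cases he : i = j
  · rw [he]
  · have hi : i < j := by omega
    have hjlen : j < (cs.length : Int) := pvGet_lt_length cs j (by omega) _ hj
    have h1 : i < (cs.length : Int) := by omega
    have hopen : ¬ PySem.List.slice cs (some i) (some (i + 2)) = ['{', '|'] := by
      intro hc
      obtain ⟨ha, hb⟩ := (pvSlice2_iff cs i h0 _ _).mp hc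
      by_cases hij2 : i + 1 < j
      · exact hnb (i+1) (by omega) hij2 hb
      · have he2 : i = j - 1 := by omega
        exact hno (by omega) (he2 ▸ ha)
    have hclose : ¬ PySem.List.slice cs (some i) (some (i + 2)) = ['|', '}'] :=
      fun hc => hnb i le_rfl (by omega) ((pvSlice2_iff cs i h0 _ _).mp hc).1
    rw [pvMatchesA]
    simp only [h1, hopen, hclose, dif_pos, if_false]
    exact pvMatchesA_skip_to cs j hj (i+1) (by omega) (by omega)
      (fun hle hg => hno (by omega) hg)
      (fun p hp1 hp2 => hnb p (by omega) hp2)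
termination_by (j - i).toNat
decreasing_by omega

-- A's per-position tokenizer equals B's find-jump tokenizer (with adequate fuel)
theorem pvMatchesA_eq_go (cs : List Char) : ∀ (fuel : Nat) (i : Int), 0 ≤ i →
    (cs.length : Int) < i + fuel → pvMatchesA cs i = pvTokensBGo cs fuel i := by
  intro fuel
  induction fuel with
  | zero =>
    intro i h0 hlen
    rw [pvMatchesA, pvTokensBGo]
    simp [show ¬ i < (cs.length : Int) by omega]
  | succ fuel ih =>
    intro i h0 hlen
    by_cases hf : PySem.Chars.findFrom cs ['|'] i none = -1
    · rw [pvTokensBGo]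
      simp only [hf, if_pos]
      exact pvMatchesA_nil cs i h0 (pvFind_bar_none cs i h0 hf)
    · obtain ⟨hij, hjlen⟩ := pvFind_bar_lt cs i hf
      obtain ⟨hj, hmin⟩ := pvFind_bar_spec cs i h0 hf
      rw [pvTokensBGo]
      set j := PySem.Chars.findFrom cs ['|'] i none with hjdef
      by_cases hop : i ≤ j - 1 ∧ PySem.List.pyGet? cs (j - 1) = some '{'
      · rw [pvMatchesA_skip_open cs j hj i h0 hop.1 hmin]
        have hjm1 : (0:Int) ≤ j - 1 := by omega
        have hlt : j - 1 < (cs.length : Int) := by omega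
        have hsl : PySem.List.slice cs (some (j-1)) (some ((j-1) + 2)) = ['{', '|'] :=
          (pvSlice2_iff cs (j-1) hjm1 _ _).mpr ⟨hop.2, by rw [(by ring : j - 1 + 1 = j)]; exact hj⟩
        rw [pvMatchesA]
        rw [(by ring : j - 1 + 2 = j + 1)] at hsl
        rw [show ((j : Int) - 1 + 2) = j + 1 from by ring]
        simp [hlt, hsl, hf, hop]
        rw [ih (j+1) (by omega) (by push_cast at hlen; omega)]
      · have hnopen : ¬ PySem.List.slice cs (some j) (some (j + 2)) = ['{', '|'] := by
          intro hc
          have ha := ((pvSlice2_iff cs j (by omega) _ _).mp hc).1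
          rw [hj] at ha
          simp at ha
        rw [pvMatchesA_skip_to cs j hj i h0 hij (fun hle hg => hop ⟨hle, hg⟩) hmin]
        by_cases hcl : PySem.List.slice cs (some (j + 1)) (some (j + 2)) = ['}']
        · have hcl' : PySem.List.pyGet? cs (j + 1) = some '}' :=
            (pvSlice1_iff cs (j+1) (by omega) _).mp (by rw [(by ring : j + 1 + 1 = j + 2)]; exact hcl)
          have hsl : PySem.List.slice cs (some j) (some (j + 2)) = ['|', '}'] :=
            (pvSlice2_iff cs j (by omega) _ _).mpr ⟨hj, hcl'⟩
          rw [pvMatchesA]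
          rw [if_neg hf, if_neg hop, if_pos hcl, dif_pos hjlen, if_neg hnopen, if_pos hsl]
          rw [ih (j+2) (by omega) (by push_cast at hlen; omega)]
        · have hnclose : ¬ PySem.List.slice cs (some j) (some (j + 2)) = ['|', '}'] := by
            intro hc
            have hb := ((pvSlice2_iff cs j (by omega) _ _).mp hc).2
            have := (pvSlice1_iff cs (j+1) (by omega) ('}' : Char)).mpr hb
            rw [(by ring : j + 1 + 1 = j + 2)] at this
            exact hcl this
          rw [pvMatchesA]
          rw [if_neg hf, if_neg hop, if_neg hcl, dif_pos hjlen, if_neg hnopen, if_neg hnclose]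
          rw [ih (j+1) (by omega) (by push_cast at hlen; omega)]

theorem pvMatchesA_eq_tokensB (cs : List Char) (i : Int) (h0 : 0 ≤ i) :
    pvMatchesA cs i = pvTokensB cs i := by
  unfold pvTokensB
  exact pvMatchesA_eq_go cs (cs.length + 1) i h0 (by push_cast; omega)

-- ===== VERDICT (by name: the statement is the Claim_ definition above) =====
theorem find_table_end_py_spec : Claim_equal_find_table_end_py := by
  intro wikitext start _ hpre
  unfold Spec_find_table_end_py find_table_end_py find_table_end_py_alt
  rw [pvLoopAGo_eq_foldT wikitext.toList _ 0 start (by omega),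
    pvMatchesA_eq_tokensB wikitext.toList start hpre, pvSearch_zip_accum]
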